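-- pv_equiv track=rewrite | github.com/ahh13781999/THyGen | fine-tuning/resample(2).py | is_noisy_data
-- ===== SOURCE A (Python) =====
-- def is_noisy_data(features):
--     noise_indicators = [
--         'RANDOM', 'EXAMPLE', 'TEST', 'DUMMY',
--         'malware', 'exploit', 'hack', 'attack',
--         'virus', 'ransomware', 'backdoor'
--     ]
--     return any(
--         any(indicator.lower() in str(v).lower() for indicator in noise_indicators)
--         or len(str(v)) > 128
--         for v in features.values()
--     )
-- ===== SOURCE B (Python) =====
-- WORDS = frozenset(['random', 'example', 'test', 'dummy',
--                    'malware', 'exploit', 'hack', 'attack',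
--                    'virus', 'ransomware', 'backdoor'])
-- _LENS = (4, 5, 6, 7, 8, 10)  # the distinct indicator lengths
--
--
-- def is_noisy_data(features):
--     # n-gram index: build the set of all substrings of the lowered value whose
--     # length is an indicator length, then intersect with the indicator set,
--     # instead of running a substring search per indicator.
--     for v in features.values():
--         s = str(v)
--         if len(s) > 128:
--             return True
--         low = s.lower()
--         grams = {low[i:i+L] for i in range(len(low)) for L in _LENS}
--         if WORDS & grams:
--             return True
--     return False
-- ===== Notes on version B (the rewrite author's own statement) =====
-- stated objective: alternative
-- what changed: Instead of running a case-folded substring search per indicator, B builds for each lowered value the set of all its substrings of the six indicator lengths and tests whether that n-gram set intersects a precomputed frozenset of indicators (length guard first, early-return loop).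
import Mathlib
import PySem

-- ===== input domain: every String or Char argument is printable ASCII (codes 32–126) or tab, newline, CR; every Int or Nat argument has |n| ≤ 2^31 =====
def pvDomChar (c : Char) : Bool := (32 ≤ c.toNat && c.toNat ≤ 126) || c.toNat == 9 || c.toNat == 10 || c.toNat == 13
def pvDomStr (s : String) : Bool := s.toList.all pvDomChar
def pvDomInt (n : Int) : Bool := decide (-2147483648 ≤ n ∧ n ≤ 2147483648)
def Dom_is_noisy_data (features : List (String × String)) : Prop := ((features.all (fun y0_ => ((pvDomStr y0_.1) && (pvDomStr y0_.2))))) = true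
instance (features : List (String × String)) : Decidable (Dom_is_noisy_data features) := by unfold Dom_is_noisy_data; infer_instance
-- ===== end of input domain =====

-- B indexes each lowered value by the set of its substrings of indicator length and
-- intersects it with a set of indicators, instead of A's per-indicator substring
-- search (alternative algorithm; early-return loop with the length guard first).


-- ===== PORT A =====
def pvIndicatorsA : List String :=
  ["RANDOM", "EXAMPLE", "TEST", "DUMMY",
   "malware", "exploit", "hack", "attack",
   "virus", "ransomware", "backdoor"]

-- str(v) is v itself (values are strings)
def is_noisy_data (features : List (String × String)) : Bool :=
  ((PySem.Dict.ofList features).values).any (fun v =>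
    pvIndicatorsA.any (fun ind =>
      PySem.Str.isIn (PySem.Str.lower ind) (PySem.Str.lower v))
    || decide (128 < PySem.Str.len v))

-- ===== PORT B =====
-- WORDS = frozenset([...]) (the literals are already lowercase)
def pvWordListB : List (List Char) :=
  ["random".toList, "example".toList, "test".toList, "dummy".toList,
   "malware".toList, "exploit".toList, "hack".toList, "attack".toList,
   "virus".toList, "ransomware".toList, "backdoor".toList]

def pvWordsB : PySem.Set (List Char) := PySem.Set.ofList pvWordListB

-- _LENS = (4, 5, 6, 7, 8, 10)
def pvLensB : List Nat := [4, 5, 6, 7, 8, 10]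

-- low[i:i+L]
def pvSlice (low : List Char) (i L : Nat) : List Char :=
  PySem.List.slice low (some (i : Int)) (some ((i : Int) + (L : Int)))

-- grams = {low[i:i+L] for i in range(len(low)) for L in _LENS}
def pvGrams (low : List Char) : PySem.Set (List Char) :=
  PySem.Set.ofList
    ((List.range low.length).flatMap (fun i => pvLensB.map (fun L => pvSlice low i L)))

-- the for-loop over features.values() with its early returns
def pvLoopB : List String → Bool
  | [] => false
  | v :: rest =>
    if 128 < PySem.Str.len v then true
    else if (PySem.Set.inter pvWordsB (pvGrams (PySem.Chars.lower v.toList))).isEmpty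
    then pvLoopB rest
    else true

def is_noisy_data_alt (features : List (String × String)) : Bool :=
  pvLoopB (PySem.Dict.ofList features).values

-- ===== PRECONDITION & SPEC =====
def Spec_is_noisy_data (features : List (String × String)) (out : Bool) : Prop := out = is_noisy_data_alt features
instance (features : List (String × String)) (out : Bool) : Decidable (Spec_is_noisy_data features out) := by unfold Spec_is_noisy_data; infer_instance

-- ===== CLAIM (what is proved, stated in full; the proofs are below) =====
def Claim_equal_is_noisy_data : Prop := ∀ (features : List (String × String)), Dom_is_noisy_data features → Spec_is_noisy_data features (is_noisy_data features)

-- ===== LEMMAS AND PROOFS =====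

-- shape facts about the word list
theorem pvWords_shape : ∀ w ∈ pvWordListB, w ≠ [] ∧ w.length ∈ pvLensB := by
  intro w hw; fin_cases hw <;> exact ⟨by decide, by decide⟩

theorem pvSlice_eq (low : List Char) (i L : Nat) :
    pvSlice low i L = (low.drop i).take L := by
  unfold pvSlice; exact PySem.List.slice_natCast_add low i L

theorem pvWordsB_eq : pvWordsB = pvWordListB := by
  unfold pvWordsB
  apply PySem.Set.ofList_eq_self_of_nodup
  decide

theorem pvMap_eq : pvIndicatorsA.map (fun i => PySem.Chars.lower i.toList) = pvWordListB := by
  rfl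

-- a word of indicator shape is a gram of low iff it is an infix of low
theorem pvMem_grams (low w : List Char) (hne : w ≠ []) (hlen : w.length ∈ pvLensB) :
    w ∈ pvGrams low ↔ w <:+: low := by
  unfold pvGrams
  rw [PySem.Set.mem_ofList]
  simp only [pvSlice_eq, List.mem_flatMap, List.mem_map, List.mem_range]
  constructor
  · rintro ⟨i, _, L, _, rfl⟩
    exact (List.take_prefix _ _).isInfix.trans (List.drop_suffix _ _).isInfix
  · rintro ⟨s, t, rfl⟩
    refine ⟨s.length, ?_, w.length, hlen, ?_⟩
    · have : 0 < w.length := List.length_pos_iff.mpr hne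
      simp only [List.length_append]
      omega
    · rw [List.append_assoc, List.drop_left, List.take_left]

-- the set intersection is nonempty iff some indicator occurs in low
theorem pvInter_eq (low : List Char) :
    (!(PySem.Set.inter pvWordsB (pvGrams low)).isEmpty)
      = pvIndicatorsA.any (fun ind => PySem.Chars.isIn (PySem.Chars.lower ind.toList) low) := by
  have hA : pvIndicatorsA.any (fun ind => PySem.Chars.isIn (PySem.Chars.lower ind.toList) low)
      = pvWordListB.any (fun w => PySem.Chars.isIn w low) := by
    rw [← pvMap_eq, List.any_map]; rfl
  rw [hA, Bool.eq_iff_iff, Bool.not_eq_true', List.isEmpty_eq_false_iff_exists_mem,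
    List.any_eq_true]
  constructor
  · rintro ⟨w, hw⟩
    rw [PySem.Set.mem_inter, pvWordsB_eq] at hw
    obtain ⟨hws, hwg⟩ := hw
    refine ⟨w, hws, ?_⟩
    rw [PySem.Chars.isIn_iff_infix]
    exact (pvMem_grams low w (pvWords_shape w hws).1 (pvWords_shape w hws).2).mp hwg
  · rintro ⟨w, hws, hisin⟩
    refine ⟨w, ?_⟩
    rw [PySem.Set.mem_inter, pvWordsB_eq]
    refine ⟨hws, (pvMem_grams low w (pvWords_shape w hws).1 (pvWords_shape w hws).2).mpr ?_⟩
    rw [← PySem.Chars.isIn_iff_infix]; exact hisin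

-- per-value agreement of A's test with B's test
theorem pvValue_eq (v : String) :
    (pvIndicatorsA.any (fun ind =>
        PySem.Str.isIn (PySem.Str.lower ind) (PySem.Str.lower v))
      || decide (128 < PySem.Str.len v))
    = (if 128 < PySem.Str.len v then true
       else !(PySem.Set.inter pvWordsB (pvGrams (PySem.Chars.lower v.toList))).isEmpty) := by
  by_cases h : 128 < PySem.Str.len v
  · rw [if_pos h, decide_eq_true h, Bool.or_true]
  · rw [if_neg h, decide_eq_false h, Bool.or_false, pvInter_eq]
    simp only [PySem.Str.isIn_eq, PySem.Str.toList_lower]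

-- B's early-return loop equals A's any over the same value list
theorem pvLoopB_eq (vs : List String) :
    pvLoopB vs = vs.any (fun v =>
      pvIndicatorsA.any (fun ind =>
        PySem.Str.isIn (PySem.Str.lower ind) (PySem.Str.lower v))
      || decide (128 < PySem.Str.len v)) := by
  induction vs with
  | nil => rfl
  | cons v rest ih =>
    rw [List.any_cons, pvValue_eq v, pvLoopB, ih]
    by_cases h1 : 128 < PySem.Str.len v
    · rw [if_pos h1, if_pos h1, Bool.true_or]
    · rw [if_neg h1, if_neg h1]
      cases h2 : (PySem.Set.inter pvWordsB (pvGrams (PySem.Chars.lower v.toList))).isEmpty <;> simp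

-- ===== VERDICT (by name: the statement is the Claim_ definition above) =====
theorem is_noisy_data_spec : Claim_equal_is_noisy_data := by
  intro features _
  unfold Spec_is_noisy_data is_noisy_data is_noisy_data_alt
  rw [pvLoopB_eq]
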